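-- pv_equiv track=rewrite | github.com/GregSQT/40k | ai/hidden_action_finder.py | _get_episode_with_fallback
-- ===== SOURCE A (Python) =====
-- from typing import Dict, List, Tuple, Set, Optional
--
-- def _get_episode_with_fallback(line_num: int, episode_map: Dict[int, int]) -> int:
--     """
--     Get episode for a line number with fallback logic.
--
--     If episode is not mapped, infer from context by finding the last known episode
--     before this line. This prevents skipping valid log entries due to mapping gaps.
--
--     Args:
--         line_num: Line number in step.log
--         episode_map: Dictionary mapping line numbers to episode numbers
--
--     Returns:
--         Episode number (defaults to 1 if no mapping found)
--     """
--     if line_num in episode_map: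
--         episode = episode_map[line_num]
--     else:
--         episode = None
--     if episode is None:
--         # Find the last known episode before this line
--         last_episode = 1  # Default to episode 1
--         for prev_line_num in range(line_num - 1, 0, -1):
--             if prev_line_num in episode_map:
--                 last_episode = episode_map[prev_line_num]
--                 break
--         episode = last_episode
--     return episode
-- ===== SOURCE B (Python) =====
-- def _get_episode_with_fallback(line_num: int, episode_map: dict) -> int:
--     # One pass over the map keys instead of counting down line numbers:
--     # exact match wins; otherwise the greatest mapped line in (0, line_num); else 1.
--     if line_num in episode_map:
--         return episode_map[line_num]
--     candidates = [k for k in episode_map if 0 < k < line_num]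
--     if not candidates:
--         return 1
--     return episode_map[max(candidates)]
-- ===== Notes on version B (the rewrite author's own statement) =====
-- stated objective: alternative
-- what changed: Instead of scanning every line number from line_num-1 down to 1 testing dict membership, B makes one pass over the map's keys and takes the greatest mapped key below line_num.
import Mathlib
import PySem

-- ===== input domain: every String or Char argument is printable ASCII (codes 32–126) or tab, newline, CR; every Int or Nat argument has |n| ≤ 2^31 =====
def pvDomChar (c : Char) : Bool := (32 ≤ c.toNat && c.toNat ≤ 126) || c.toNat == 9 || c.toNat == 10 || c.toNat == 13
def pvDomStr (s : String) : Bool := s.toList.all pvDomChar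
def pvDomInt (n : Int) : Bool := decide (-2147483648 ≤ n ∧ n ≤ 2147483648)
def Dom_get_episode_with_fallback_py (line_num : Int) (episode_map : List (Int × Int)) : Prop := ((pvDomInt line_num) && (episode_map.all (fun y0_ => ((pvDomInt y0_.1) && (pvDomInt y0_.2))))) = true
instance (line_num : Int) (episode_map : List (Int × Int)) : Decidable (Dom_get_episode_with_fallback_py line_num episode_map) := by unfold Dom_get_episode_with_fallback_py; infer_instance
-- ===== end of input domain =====

-- B replaces A's countdown scan over line numbers by one pass over the map's keys
-- (greatest mapped key below line_num); objective: alternative algorithm, cost O(len(map)) instead of O(line_num).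


-- ===== PORT A =====
-- the `for prev_line_num in range(line_num - 1, 0, -1): if prev_line_num in episode_map: …; break`
-- loop: fuel = number of range elements, cur = the running range value
def pvFindPrev (episode_map : List (Int × Int)) : Nat → Int → Int
  | 0, _ => 1
  | n + 1, cur =>
    match (PySem.Dict.mk episode_map).get? cur with
    | some v => v
    | none => pvFindPrev episode_map n (cur - 1)

def get_episode_with_fallback_py (line_num : Int) (episode_map : List (Int × Int)) : Int :=
  match (PySem.Dict.mk episode_map).get? line_num with
  | some v => v
  | none => pvFindPrev episode_map (line_num - 1).toNat (line_num - 1)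

-- ===== PORT B =====
def get_episode_with_fallback_py_alt (line_num : Int) (episode_map : List (Int × Int)) : Int :=
  match (PySem.Dict.mk episode_map).get? line_num with
  | some v => v
  | none =>
    let candidates := ((PySem.Dict.mk episode_map).keys).filter
      (fun k => decide (0 < k) && decide (k < line_num))
    match PySem.List.max? candidates (fun x => x) with
    | none => 1
    | some m => ((PySem.Dict.mk episode_map).get? m).getD 1  -- m ∈ keys, so get? is some

-- ===== PRECONDITION & SPEC =====
def Spec_get_episode_with_fallback_py (line_num : Int) (episode_map : List (Int × Int)) (out : Int) : Prop := out = get_episode_with_fallback_py_alt line_num episode_map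
instance (line_num : Int) (episode_map : List (Int × Int)) (out : Int) : Decidable (Spec_get_episode_with_fallback_py line_num episode_map out) := by unfold Spec_get_episode_with_fallback_py; infer_instance

-- ===== CLAIM (what is proved, stated in full; the proofs are below) =====
def Claim_equal_get_episode_with_fallback_py : Prop := ∀ (line_num : Int) (episode_map : List (Int × Int)), Dom_get_episode_with_fallback_py line_num episode_map → Spec_get_episode_with_fallback_py line_num episode_map (get_episode_with_fallback_py line_num episode_map)

-- ===== LEMMAS AND PROOFS =====

-- the countdown loop from `cur` with `n` steps left returns the value of the greatest
-- mapped key in the window (cur - n, cur], or 1 if the window holds no mapped key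
lemma pvFindPrev_eq_max (episode_map : List (Int × Int)) (n : Nat) (cur : Int) :
    pvFindPrev episode_map n cur =
      match PySem.List.max?
          (((PySem.Dict.mk episode_map).keys).filter
            (fun k => decide (cur - (n : Int) < k) && decide (k ≤ cur))) (fun x => x) with
      | none => 1
      | some m => ((PySem.Dict.mk episode_map).get? m).getD 1 := by
  induction n generalizing cur with
  | zero =>
    have h : (((PySem.Dict.mk episode_map).keys).filter
        (fun k => decide (cur - ((0 : Nat) : Int) < k) && decide (k ≤ cur))) = [] := by
      rw [List.filter_eq_nil_iff]
      intro k _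
      simp only [Bool.and_eq_true, decide_eq_true_eq, not_and]
      omega
    show (1 : Int) = _
    rw [h]
    rfl
  | succ n ih =>
    show (match (PySem.Dict.mk episode_map).get? cur with
      | some v => v
      | none => pvFindPrev episode_map n (cur - 1)) = _
    cases hg : (PySem.Dict.mk episode_map).get? cur with
    | some v =>
      have hmem : cur ∈ (PySem.Dict.mk episode_map).keys := by
        by_contra hc
        rw [(PySem.Dict.get?_eq_none_iff_not_mem_keys _ _).mpr hc] at hg
        simp at hg
      have hcurf : cur ∈ (((PySem.Dict.mk episode_map).keys).filter
          (fun k => decide (cur - ((n + 1 : Nat) : Int) < k) && decide (k ≤ cur))) := by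
        rw [List.mem_filter]
        refine ⟨hmem, ?_⟩
        simp only [Bool.and_eq_true, decide_eq_true_eq]
        constructor <;> omega
      cases hmax : PySem.List.max?
          (((PySem.Dict.mk episode_map).keys).filter
            (fun k => decide (cur - ((n + 1 : Nat) : Int) < k) && decide (k ≤ cur))) (fun x => x) with
      | none =>
        rw [PySem.List.max?_eq_none_iff] at hmax
        rw [hmax] at hcurf
        exact absurd hcurf (List.not_mem_nil)
      | some m =>
        have hmf := PySem.List.max?_mem hmax
        have hmle : m ≤ cur := by
          rw [List.mem_filter] at hmf
          have := hmf.2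
          simp only [Bool.and_eq_true, decide_eq_true_eq] at this
          exact this.2
        have hcle : cur ≤ m := PySem.List.max?_isMax hmax cur hcurf
        have hmc : m = cur := le_antisymm hmle hcle
        rw [hmc]
        show v = ((PySem.Dict.mk episode_map).get? cur).getD 1
        rw [hg]
        rfl
    | none =>
      have hnk : cur ∉ (PySem.Dict.mk episode_map).keys :=
        (PySem.Dict.get?_eq_none_iff_not_mem_keys _ _).mp hg
      have hfil : (((PySem.Dict.mk episode_map).keys).filter
            (fun k => decide (cur - ((n + 1 : Nat) : Int) < k) && decide (k ≤ cur)))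
          = (((PySem.Dict.mk episode_map).keys).filter
            (fun k => decide ((cur - 1) - (n : Int) < k) && decide (k ≤ cur - 1))) := by
        apply List.filter_congr
        intro k hk
        have hkc : k ≠ cur := fun h => hnk (h ▸ hk)
        rw [Bool.eq_iff_iff]
        simp only [Bool.and_eq_true, decide_eq_true_eq]
        constructor <;> (intro; constructor <;> omega)
      rw [hfil, ih (cur - 1)]

-- ===== VERDICT (by name: the statement is the Claim_ definition above) =====
theorem get_episode_with_fallback_py_spec : Claim_equal_get_episode_with_fallback_py := by
  intro line_num episode_map _
  unfold Spec_get_episode_with_fallback_py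
  unfold get_episode_with_fallback_py get_episode_with_fallback_py_alt
  cases hg : (PySem.Dict.mk episode_map).get? line_num with
  | some v => rfl
  | none =>
    rw [pvFindPrev_eq_max]
    have hfil : (((PySem.Dict.mk episode_map).keys).filter
          (fun k => decide ((line_num - 1) - (((line_num - 1).toNat : Nat) : Int) < k)
            && decide (k ≤ line_num - 1)))
        = (((PySem.Dict.mk episode_map).keys).filter
          (fun k => decide (0 < k) && decide (k < line_num))) := by
      apply List.filter_congr
      intro k _
      rw [Bool.eq_iff_iff]
      simp only [Bool.and_eq_true, decide_eq_true_eq]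
      constructor <;> (intro; constructor <;> omega)
    rw [hfil]
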